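-- pv_equiv track=rewrite | github.com/vipongo/introductionToComputerSecuritySmallChallenges | pr2/hex2base.py | fillupbyte
-- ===== SOURCE A (Python) =====
-- def fillupbyte(value):
--     '''
--     >>> fillupbyte('011')
--     '00000011'
--     >>> fillupbyte('1')
--     '00000001'
--     >>> fillupbyte('10111')
--     '00010111'
--     >>> fillupbyte('11100111')
--     '11100111'
--     >>> fillupbyte('111001111')
--     '0000000111001111'
--     '''
--     fillupbyte = value
--     length = len(value)
--     if (length%8 != 0):
--         toAdd = 8 - (length%8)
--         for _ in range(toAdd):
--             fillupbyte = "0" + fillupbyte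
--     return fillupbyte
-- ===== SOURCE B (Python) =====
-- def fillupbyte(value):
--     width = ((len(value) + 7) // 8) * 8
--     return value.rjust(width, "0")
-- ===== Notes on version B (the rewrite author's own statement) =====
-- stated objective: simpler
-- what changed: Replaces the length%8 guard and the character-prepending loop with a closed-form target width ((len+7)//8*8) and a single rjust pad.
import Mathlib
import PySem

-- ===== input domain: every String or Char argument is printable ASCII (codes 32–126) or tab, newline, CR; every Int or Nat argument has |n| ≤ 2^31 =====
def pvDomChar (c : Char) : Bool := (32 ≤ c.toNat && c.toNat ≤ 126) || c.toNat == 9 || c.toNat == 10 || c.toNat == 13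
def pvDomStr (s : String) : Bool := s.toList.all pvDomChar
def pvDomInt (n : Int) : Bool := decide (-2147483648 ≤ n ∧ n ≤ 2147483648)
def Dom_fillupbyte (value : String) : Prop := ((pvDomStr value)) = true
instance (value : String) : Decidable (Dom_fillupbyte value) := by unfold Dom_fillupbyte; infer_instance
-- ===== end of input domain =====

-- ===== PORT A =====
-- A: if len%8 != 0, prepend "0" (8 - len%8) times in a loop.
def fillupbyte (value : String) : String :=
  let fb := value.toList
  let length := value.toList.length
  if length % 8 ≠ 0 then
    let toAdd := 8 - length % 8
    String.mk ((List.range toAdd).foldl (fun acc _ => '0' :: acc) fb)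
  else String.mk fb

-- ===== PORT B =====
-- B: closed-form width = ((len+7)//8)*8, then rjust(width, "0") (pad = replicate (width-len)).
def fillupbyte_alt (value : String) : String :=
  let n := value.toList.length
  let width := ((n + 7) / 8) * 8
  String.mk (List.replicate (width - n) '0' ++ value.toList)

-- ===== PRECONDITION & SPEC =====
def Spec_fillupbyte (value : String) (out : String) : Prop := out = fillupbyte_alt value
instance (value : String) (out : String) : Decidable (Spec_fillupbyte value out) := by unfold Spec_fillupbyte; infer_instance

-- ===== CLAIM (what is proved, stated in full; the proofs are below) =====
def Claim_equal_fillupbyte : Prop := ∀ (value : String), Dom_fillupbyte value → Spec_fillupbyte value (fillupbyte value)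

-- ===== LEMMAS AND PROOFS =====

-- ===== VERDICT (by name: the statement is the Claim_ definition above) =====
lemma foldl_prepend_zero (k : Nat) (l : List Char) :
    (List.range k).foldl (fun acc _ => '0' :: acc) l = List.replicate k '0' ++ l := by
  induction k with
  | zero => simp
  | succ k ih =>
      rw [List.range_succ, List.foldl_append, ih]
      simp [List.replicate_succ]

theorem fillupbyte_spec : Claim_equal_fillupbyte := by
  intro value _
  unfold Spec_fillupbyte fillupbyte fillupbyte_alt
  simp only [foldl_prepend_zero]
  set n := value.toList.length with hn
  split_ifs with h
  · have : 8 - n % 8 = ((n + 7) / 8) * 8 - n := by omega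
    rw [this]
  · have : ((n + 7) / 8) * 8 - n = 0 := by omega
    simp [this]
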